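-- pv_equiv track=rewrite | github.com/yanncalec/pyshm | pyshm/Tools.py | find_block_true
-- ===== SOURCE A (Python) =====
-- def find_block_true(X):
--     """
--     Find the starting and ending positions of True blocks in a boolean array.
--
--     Example:
--     for X = [0, 1, 1, 1, 0, 1], the returned list is [[1,4], [5,6]]
--
--     """
--     n = 0
--     sidx = []
--     while n < len(X):
--         if X[n]:
--             a, b = n, n+1
--             while b<len(X) and X[b]:
--                 b += 1
--             sidx.append([a,b])
--             n = b
--         n += 1
--     return sidx
-- ===== SOURCE B (Python) =====
-- from itertools import groupby
--
-- def find_block_true(X):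
--     res = []
--     pos = 0
--     for k, g in groupby(X, key=bool):
--         length = sum(1 for _ in g)
--         if k:
--             res.append([pos, pos + length])
--         pos += length
--     return res
-- ===== Notes on version B (the rewrite author's own statement) =====
-- stated objective: idiomatic
-- what changed: Replaced the index-based nested while loops with a single itertools.groupby pass over truthiness runs, accumulating positions from run lengths.
import Mathlib
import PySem

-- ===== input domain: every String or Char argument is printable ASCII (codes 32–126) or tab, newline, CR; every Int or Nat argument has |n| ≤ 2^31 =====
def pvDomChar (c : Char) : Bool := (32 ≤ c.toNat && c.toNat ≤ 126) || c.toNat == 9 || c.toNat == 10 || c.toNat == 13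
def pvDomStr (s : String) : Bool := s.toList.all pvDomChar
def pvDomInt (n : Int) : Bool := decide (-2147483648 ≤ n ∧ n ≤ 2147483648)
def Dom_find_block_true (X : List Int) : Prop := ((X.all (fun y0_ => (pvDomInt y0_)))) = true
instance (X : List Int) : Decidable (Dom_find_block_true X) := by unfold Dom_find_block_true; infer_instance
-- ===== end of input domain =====

-- B replaces A's index-based nested while loops with a run-grouping (groupby) single pass; objective: more idiomatic.

-- ===== PORT A =====
-- inner 'while b < len(X) and X[b]: b += 1'
def fbtInner (X : List Int) (b : Nat) : Nat :=
  if b < X.length ∧ X.getD b 0 ≠ 0 then fbtInner X (b + 1) else b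
termination_by X.length - b
decreasing_by omega

theorem fbtInner_ge (X : List Int) (b : Nat) : b ≤ fbtInner X b := by
  unfold fbtInner
  split
  · have := fbtInner_ge X (b + 1); omega
  · exact le_refl b
termination_by X.length - b
decreasing_by omega

-- outer 'while n < len(X): …'
def fbtOuter (X : List Int) (n : Nat) (sidx : List (List Int)) : List (List Int) :=
  if n < X.length then
    if X.getD n 0 ≠ 0 then
      let b := fbtInner X (n + 1)
      fbtOuter X (b + 1) (sidx ++ [[(n : Int), (b : Int)]])
    else fbtOuter X (n + 1) sidx
  else sidx
termination_by X.length - n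
decreasing_by
  · have := fbtInner_ge X (n + 1); omega
  · omega

def find_block_true (X : List Int) : List (List Int) := fbtOuter X 0 []

-- ===== PORT B =====
-- itertools.groupby(X, key=bool) rendered as a list of (key, run-length) pairs
def fbtRuns : List Int → List (Bool × Nat)
  | [] => []
  | x :: xs =>
    let k : Bool := x != 0
    (k, (xs.takeWhile (fun y => (y != 0) == k)).length + 1)
      :: fbtRuns (xs.dropWhile (fun y => (y != 0) == k))
termination_by l => l.length
decreasing_by
  have := List.length_dropWhile_le (fun y => (y != 0) == (x != 0)) xs
  simp; omega

-- the for loop over groupby, state = (res, pos)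
def find_block_true_alt (X : List Int) : List (List Int) :=
  ((fbtRuns X).foldl
    (fun (st : List (List Int) × Nat) kg =>
      (if kg.1 then st.1 ++ [[(st.2 : Int), (st.2 : Int) + (kg.2 : Int)]] else st.1,
       st.2 + kg.2))
    ([], 0)).1

-- ===== PRECONDITION & SPEC =====
def Spec_find_block_true (X : List Int) (out : List (List Int)) : Prop := out = find_block_true_alt X
instance (X : List Int) (out : List (List Int)) : Decidable (Spec_find_block_true X out) := by unfold Spec_find_block_true; infer_instance

-- ===== CLAIM (what is proved, stated in full; the proofs are below) =====
def Claim_equal_find_block_true : Prop := ∀ (X : List Int), Dom_find_block_true X → Spec_find_block_true X (find_block_true X)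

-- ===== LEMMAS AND PROOFS =====

def fbtStep (st : List (List Int) × Nat) (kg : Bool × Nat) : List (List Int) × Nat :=
  (if kg.1 then st.1 ++ [[(st.2 : Int), (st.2 : Int) + (kg.2 : Int)]] else st.1,
   st.2 + kg.2)

def fbtFold (rs : List (Bool × Nat)) (acc : List (List Int)) (pos : Nat) : List (List Int) :=
  (rs.foldl fbtStep (acc, pos)).1

theorem fbtFold_cons (k : Bool) (l : Nat) (rs : List (Bool × Nat)) (acc : List (List Int)) (pos : Nat) :
    fbtFold ((k, l) :: rs) acc pos =
      fbtFold rs (if k then acc ++ [[(pos : Int), (pos : Int) + (l : Int)]] else acc) (pos + l) := by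
  cases k <;> simp [fbtFold, fbtStep]

theorem fbtRuns_cons_true (x : Int) (xs : List Int) (hx : x ≠ 0) :
    fbtRuns (x :: xs) =
      (true, (xs.takeWhile (fun y => y != 0)).length + 1)
        :: fbtRuns (xs.dropWhile (fun y => y != 0)) := by
  have hx' : (x != 0) = true := by simpa using hx
  rw [fbtRuns]
  simp only [hx']
  have hp : (fun y => (y != 0) == true) = (fun y : Int => y != 0) := by
    funext y; cases h : (y != 0) <;> simp_all
  rw [hp]

theorem fbtRuns_cons_false (xs : List Int) :
    fbtRuns ((0 : Int) :: xs) =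
      (false, (xs.takeWhile (fun y => y == 0)).length + 1)
        :: fbtRuns (xs.dropWhile (fun y => y == 0)) := by
  rw [fbtRuns]
  simp only [show ((0 : Int) != 0) = false from rfl]
  have hp : (fun y => (y != 0) == false) = (fun y : Int => y == 0) := by
    funext y; cases h : (y == 0) <;> simp [bne, h]
  rw [hp]

theorem dropWhile_eq_drop_tw {p : Int → Bool} : ∀ (l : List Int),
    l.dropWhile p = l.drop (l.takeWhile p).length := by
  intro l
  induction l with
  | nil => rfl
  | cons a t ih =>
    cases h : p a <;> simp [h, ih]

theorem dropWhile_head_false {p : Int → Bool} : ∀ (l : List Int) (a : Int) (t : List Int),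
    l.dropWhile p = a :: t → p a = false := by
  intro l
  induction l with
  | nil => intro a t h; simp at h
  | cons b s ih =>
    intro a t h
    cases hb : p b
    · rw [List.dropWhile_cons, hb] at h
      simp at h
      rw [h.1] at hb; exact hb
    · rw [List.dropWhile_cons, hb] at h
      exact ih a t h

-- consuming a false element advances the position by one
theorem fbtFold_false (xs : List Int) (acc : List (List Int)) (pos : Nat) :
    fbtFold (fbtRuns ((0 : Int) :: xs)) acc pos = fbtFold (fbtRuns xs) acc (pos + 1) := by
  cases xs with
  | nil =>
    rw [fbtRuns_cons_false]
    simp [fbtFold, fbtStep, fbtRuns]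
  | cons y ys =>
    by_cases hy : y = 0
    · subst hy
      rw [fbtRuns_cons_false, fbtRuns_cons_false, fbtFold_cons, fbtFold_cons]
      simp only [List.takeWhile_cons, List.dropWhile_cons,
        show ((0 : Int) == 0) = true from rfl, if_true]
      simp only [List.length_cons]
      congr 1
      omega
    · have hy' : (y == 0) = false := by simpa using hy
      rw [fbtRuns_cons_false, fbtFold_cons]
      simp [hy']

theorem drop_getD_cons (X : List Int) (n : Nat) (h : n < X.length) :
    X.drop n = X.getD n 0 :: X.drop (n + 1) := by
  rw [List.getD_eq_getElem _ _ h]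
  exact (List.drop_eq_getElem_cons h).trans rfl

theorem fbtInner_eq (X : List Int) (b : Nat) :
    fbtInner X b = b + ((X.drop b).takeWhile (fun y => y != 0)).length := by
  unfold fbtInner
  split
  · rename_i h
    obtain ⟨hlt, hne⟩ := h
    have hne' : (X.getD b 0 != 0) = true := by simpa using hne
    rw [fbtInner_eq X (b + 1), drop_getD_cons X b hlt, List.takeWhile_cons, hne']
    simp; omega
  · rename_i h
    rcases Nat.lt_or_ge b X.length with hlt | hge
    · have hz : X.getD b 0 = 0 := by by_contra hc; exact h ⟨hlt, hc⟩
      rw [drop_getD_cons X b hlt, hz]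
      simp
    · rw [List.drop_eq_nil_of_le hge]
      simp
termination_by X.length - b
decreasing_by omega

theorem fbt_main (X : List Int) (n : Nat) (acc : List (List Int)) :
    fbtOuter X n acc = fbtFold (fbtRuns (X.drop n)) acc n := by
  unfold fbtOuter
  split
  · rename_i hlt
    have hdrop := drop_getD_cons X n hlt
    by_cases hx : X.getD n 0 ≠ 0
    · rw [if_pos hx]
      have hbe : fbtInner X (n + 1)
          = n + 1 + ((X.drop (n + 1)).takeWhile (fun y => y != 0)).length :=
        fbtInner_eq X (n + 1)
      have hge := fbtInner_ge X (n + 1)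
      rw [fbt_main X (fbtInner X (n + 1) + 1) (acc ++ [[(n : Int), (fbtInner X (n + 1) : Int)]])]
      rw [hdrop, fbtRuns_cons_true _ _ hx, fbtFold_cons, if_pos rfl]
      have hdw : (X.drop (n + 1)).dropWhile (fun y => y != 0) = X.drop (fbtInner X (n + 1)) := by
        rw [dropWhile_eq_drop_tw, List.drop_drop, hbe]
      have hlit : (n : Int) + ((((X.drop (n + 1)).takeWhile (fun y => y != 0)).length + 1 : Nat) : Int)
          = (fbtInner X (n + 1) : Int) := by rw [hbe]; push_cast; ring
      have hpos : n + (((X.drop (n + 1)).takeWhile (fun y => y != 0)).length + 1)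
          = fbtInner X (n + 1) := by omega
      rw [hdw, hlit, hpos]
      -- bridge: fold from position b over runs (drop b X) = fold from b+1 over runs (drop (b+1) X)
      rcases Nat.lt_or_ge (fbtInner X (n + 1)) X.length with hb | hb
      · have hz : X.getD (fbtInner X (n + 1)) 0 = 0 := by
          have hc := drop_getD_cons X (fbtInner X (n + 1)) hb
          have := dropWhile_head_false (p := fun y => y != 0) (X.drop (n + 1))
            (X.getD (fbtInner X (n + 1)) 0) (X.drop (fbtInner X (n + 1) + 1))
            (by rw [hdw, hc])
          simpa using this
        rw [drop_getD_cons X (fbtInner X (n + 1)) hb, hz, fbtFold_false]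
      · rw [List.drop_eq_nil_of_le hb, List.drop_eq_nil_of_le (by omega)]
        rw [fbtRuns]
        rfl
    · rw [if_neg hx]
      have hx0 : X.getD n 0 = 0 := by omega
      rw [fbt_main X (n + 1) acc, hdrop, hx0, fbtFold_false]
  · rename_i h
    rw [List.drop_eq_nil_of_le (by omega), fbtRuns]
    rfl
termination_by X.length - n
decreasing_by
  · have := fbtInner_ge X (n + 1); omega
  · omega

-- ===== VERDICT (by name: the statement is the Claim_ definition above) =====
theorem find_block_true_spec : Claim_equal_find_block_true := by
  intro X _
  unfold Spec_find_block_true find_block_true find_block_true_alt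
  have h := fbt_main X 0 []
  simpa [fbtFold, fbtStep] using h
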